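-- pv_equiv track=rewrite | github.com/dshemetov/leetcode | python/problems.py | p1208
-- ===== SOURCE A (Python) =====
-- def p1208(s: str, t: str, maxCost: int) -> int:
--     """
--     1208. Get Equal Substrings Within Budget https://leetcode.com/problems/get-equal-substrings-within-budget
--
--     Lessons learned:
--     * The toughest part was correctly handling indices. I used half-open [lo, hi) intervals for a while, but things turned out cleaner with closed intervals [lo, hi].
--     * My first solution also shrunk the sliding window, until I realized that you don't need to.
--     * Worked example:
--
--     1010100100101, 2
--     [0 0] 1
--     [0 1] 1
--     [0 2] 0
--     [0 3] 0
--     [1 3] 1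
--     [1 4] 0
--     [1 5] 0
--     [1 6] 0
--     [2 6] 0
--     [3 6] 1
--     [3 7] 0
--     [3 8] 0
--     [3 9] 0
--     [4 9] 0
--     [5 9] 1
--     [5 10] 0
--     [5 11] 0
--     [6 11] 0
--     [7 11] 0
--     [8 11] 1
--     [9 12] 0
--
--     Examples:
--     >>> p1208("abcd", "bcdf", 3)
--     3
--     >>> p1208("abcd", "cdef", 3)
--     1
--     >>> p1208("abcd", "acde", 0)
--     1
--     >>> p1208("ajte", "bjte", 3)
--     4
--     >>> p1208("abcd", "cdef", 1)
--     0
--     """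
--     diffs = [abs(ord(x) - ord(y)) for x, y in zip(s, t)]
--     lo, hi, max_len = 0, 0, 0
--     currCost = maxCost
--     while hi < len(s):
--         currCost -= diffs[hi]
--         if currCost >= 0:
--             max_len = max(max_len, hi - lo + 1)
--         else:
--             currCost += diffs[lo]
--             lo += 1
--         hi += 1
--     return max_len
-- ===== SOURCE B (Python) =====
-- def _bisect_left(a, x):
--     lo, hi = 0, len(a)
--     while lo < hi:
--         mid = (lo + hi) // 2
--         if a[mid] < x:
--             lo = mid + 1
--         else:
--             hi = mid
--     return lo
--
--
-- def p1208(s: str, t: str, maxCost: int) -> int: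
--     diffs = [abs(ord(x) - ord(y)) for x, y in zip(s, t)]
--     prefix = [0]
--     for d in diffs:
--         prefix.append(prefix[-1] + d)
--     ans = 0
--     for hi in range(len(diffs)):
--         lo = _bisect_left(prefix, prefix[hi + 1] - maxCost)
--         ans = max(ans, hi + 1 - lo)
--     return ans
-- ===== Notes on version B (the rewrite author's own statement) =====
-- stated objective: alternative
-- what changed: Replaces the non-shrinking two-pointer sliding window by a prefix-sum table plus a binary search (bisect_left) for the smallest feasible left endpoint at each right endpoint.
import Mathlib
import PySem

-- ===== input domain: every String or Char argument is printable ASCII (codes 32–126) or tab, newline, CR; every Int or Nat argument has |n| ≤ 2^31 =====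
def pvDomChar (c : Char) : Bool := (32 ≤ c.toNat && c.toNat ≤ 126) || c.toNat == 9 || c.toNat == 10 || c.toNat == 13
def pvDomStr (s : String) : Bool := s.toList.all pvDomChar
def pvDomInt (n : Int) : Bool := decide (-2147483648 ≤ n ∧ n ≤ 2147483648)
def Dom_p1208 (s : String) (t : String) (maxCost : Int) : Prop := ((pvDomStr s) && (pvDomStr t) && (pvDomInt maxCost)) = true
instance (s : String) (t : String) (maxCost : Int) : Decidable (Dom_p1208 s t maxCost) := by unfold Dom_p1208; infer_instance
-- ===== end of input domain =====

-- B replaces A's non-shrinking two-pointer sliding window by a prefix-sum table plus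
-- binary search for the smallest feasible left endpoint at each right endpoint
-- (alternative algorithm, same results on all inputs where A returns; A raises IndexError when len(s) > len(t), excluded by Pre_).


-- ===== PORT A =====
-- diffs = [abs(ord(x) - ord(y)) for x, y in zip(s, t)]
def pvDiffs (s : String) (t : String) : List Int :=
  (s.toList.zip t.toList).map (fun p => |(p.1.toNat : Int) - (p.2.toNat : Int)|)

-- the while loop runs hi = 0 .. len(s)-1, one step per iteration; state (lo, max_len, currCost)
def p1208 (s : String) (t : String) (maxCost : Int) : Int :=
  let diffs := pvDiffs s t
  let fin := (List.range s.toList.length).foldl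
    (fun (st : Int × Int × Int) (hi : Nat) =>
      let lo := st.1
      let maxLen := st.2.1
      let currCost := st.2.2 - (PySem.List.pyGet? diffs (hi : Int)).getD 0
      if currCost ≥ 0 then
        (lo, max maxLen ((hi : Int) - lo + 1), currCost)
      else
        (lo + 1, maxLen, currCost + (PySem.List.pyGet? diffs lo).getD 0))
    (0, 0, maxCost)
  fin.2.1

-- ===== PORT B =====
-- prefix = [0]; for d in diffs: prefix.append(prefix[-1] + d)
def pvPrefix (diffs : List Int) : List Int :=
  diffs.foldl (fun acc d => acc ++ [(PySem.List.pyGet? acc (-1)).getD 0 + d]) [0]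

-- _bisect_left is the standard bisect.bisect_left loop = PySem.List.bisectLeft
def p1208_alt (s : String) (t : String) (maxCost : Int) : Int :=
  let diffs := pvDiffs s t
  let pfx := pvPrefix diffs
  (List.range diffs.length).foldl
    (fun (ans : Int) (hi : Nat) =>
      let lo := PySem.List.bisectLeft pfx ((PySem.List.pyGet? pfx ((hi : Int) + 1)).getD 0 - maxCost)
      max ans ((hi : Int) + 1 - (lo : Int)))
    0

-- ===== PRECONDITION & SPEC =====
-- Pre_ excludes len(s) > len(t), where A's loop indexes diffs past the zip-truncated length and raises IndexError.
def Pre_p1208 (s : String) (t : String) (maxCost : Int) : Prop :=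
  s.toList.length ≤ t.toList.length
instance (s : String) (t : String) (maxCost : Int) : Decidable (Pre_p1208 s t maxCost) := by
  unfold Pre_p1208; infer_instance

def pvWitness_p1208 : String × String × Int := ("abcd", "bcdf", 3)

def Spec_p1208 (s : String) (t : String) (maxCost : Int) (out : Int) : Prop := out = p1208_alt s t maxCost
instance (s : String) (t : String) (maxCost : Int) (out : Int) : Decidable (Spec_p1208 s t maxCost out) := by unfold Spec_p1208; infer_instance

-- ===== CLAIM (what is proved, stated in full; the proofs are below) =====
def Claim_equal_p1208 : Prop := ∀ (s : String) (t : String) (maxCost : Int), Dom_p1208 s t maxCost → Pre_p1208 s t maxCost → Spec_p1208 s t maxCost (p1208 s t maxCost)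

-- ===== LEMMAS AND PROOFS =====

def pvP (ds : List Int) (i : Nat) : Int := (ds.take i).sum

theorem build_gen (ds : List Int) : ∀ (acc : List Int) (a : Int),
    List.foldl (fun acc d => acc ++ [(PySem.List.pyGet? acc (-1)).getD 0 + d]) (acc ++ [a]) ds
      = acc ++ (List.range (ds.length + 1)).map (fun i => a + pvP ds i) := by
  induction ds with
  | nil => intro acc a; simp [pvP]
  | cons d ds ih =>
    intro acc a
    have hg : PySem.List.pyGet? (acc ++ [a]) (-1) = some a := by
      simp [PySem.List.pyGet?, PySem.List.pyIdx?]
    simp only [List.foldl_cons, hg, Option.getD_some]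
    rw [ih (acc ++ [a]) (a + d)]
    simp [List.range_succ_eq_map, List.map_map, pvP, Function.comp_def, add_assoc]

theorem pvP_succ (ds : List Int) (k : Nat) (h : k < ds.length) :
    pvP ds (k+1) = pvP ds k + ds[k] := List.sum_take_succ ds k h

theorem pvP_mono (ds : List Int) (hnn : ∀ x ∈ ds, 0 ≤ x) {i j : Nat} (hij : i ≤ j) :
    pvP ds i ≤ pvP ds j := by
  induction j with
  | zero => simp_all
  | succ j ih =>
    rcases Nat.eq_or_lt_of_le hij with rfl | hlt
    · exact le_refl _
    · have h2 : pvP ds i ≤ pvP ds j := ih (Nat.lt_succ_iff.mp hlt)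
      rcases Nat.lt_or_ge j ds.length with hj | hj
      · have := hnn ds[j] (List.getElem_mem hj)
        rw [pvP_succ ds j hj]; linarith
      · have heq : pvP ds (j+1) = pvP ds j := by
          unfold pvP; rw [List.take_of_length_le hj, List.take_of_length_le (by omega)]
        rw [heq]; exact h2

theorem pvPrefix_pairwise (ds : List Int) (hnn : ∀ x ∈ ds, 0 ≤ x) :
    List.Pairwise (fun a b => a ≤ b) ((List.range (ds.length + 1)).map (pvP ds)) :=
  List.Pairwise.map (pvP ds) (fun {a b} (hab : a < b) => pvP_mono ds hnn (le_of_lt hab)) List.pairwise_lt_range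

theorem pvPrefix_eq_map (ds : List Int) :
    pvPrefix ds = (List.range (ds.length + 1)).map (pvP ds) := by
  have := build_gen ds [] 0
  simpa [pvPrefix] using this

theorem loop_eq (ds : List Int) (maxCost : Int) (hnn : ∀ x ∈ ds, 0 ≤ x) :
    ∀ k, k ≤ ds.length → ∃ lo : Nat, lo ≤ k ∧
      (List.range k).foldl
        (fun (st : Int × Int × Int) (hi : Nat) =>
          let lo := st.1
          let maxLen := st.2.1
          let currCost := st.2.2 - (PySem.List.pyGet? ds (hi : Int)).getD 0
          if currCost ≥ 0 then
            (lo, max maxLen ((hi : Int) - lo + 1), currCost)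
          else
            (lo + 1, maxLen, currCost + (PySem.List.pyGet? ds lo).getD 0))
        (0, 0, maxCost)
        = ((lo : Int), (k : Int) - lo, maxCost - (pvP ds k - pvP ds lo)) ∧
      (List.range k).foldl
        (fun (ans : Int) (hi : Nat) =>
          let lo := PySem.List.bisectLeft (pvPrefix ds) ((PySem.List.pyGet? (pvPrefix ds) ((hi : Int) + 1)).getD 0 - maxCost)
          max ans ((hi : Int) + 1 - (lo : Int)))
        0 = (k : Int) - lo ∧
      (lo = 0 ∨ maxCost < pvP ds k - pvP ds (lo - 1)) := by
  have hpfx := pvPrefix_eq_map ds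
  have hlenp : (pvPrefix ds).length = ds.length + 1 := by rw [hpfx]; simp
  have hget : ∀ j (hj : j < (pvPrefix ds).length), (pvPrefix ds)[j] = pvP ds j := by
    intro j hj
    have hj' : j < ds.length + 1 := by omega
    simp only [hpfx]
    simp
  have hpair : List.Pairwise (fun a b => a ≤ b) (pvPrefix ds) := by
    rw [hpfx]; exact pvPrefix_pairwise ds hnn
  intro k
  induction k with
  | zero =>
    intro _
    exact ⟨0, le_refl 0, by simp [pvP], by simp, Or.inl rfl⟩
  | succ k ih =>
    intro hk1
    have hk : k < ds.length := by omega
    obtain ⟨lo, hlok, hA, hB, hinv⟩ := ih (by omega)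
    have hgetk : PySem.List.pyGet? ds (k : Int) = some ds[k] := PySem.List.pyGet?_ofNat ds k hk
    have hPk1 : pvP ds (k+1) = pvP ds k + ds[k] := pvP_succ ds k hk
    have hpget : PySem.List.pyGet? (pvPrefix ds) ((k : Int) + 1) = some (pvP ds (k+1)) := by
      have h1 : ((k : Int) + 1) = ((k+1 : Nat) : Int) := by push_cast; ring
      rw [h1, PySem.List.pyGet?_ofNat _ _ (by omega), hget (k+1) (by omega)]
    set target : Int := pvP ds (k+1) - maxCost with htarget
    set bl : Nat := PySem.List.bisectLeft (pvPrefix ds) target with hbl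
    obtain ⟨hble, hblo, hbhi⟩ := PySem.List.bisectLeft_spec (pvPrefix ds) target hpair
    rw [List.range_succ]
    rw [List.foldl_append, List.foldl_append]
    simp only [List.foldl_cons, List.foldl_nil, hA, hB]
    simp only [hgetk, Option.getD_some, hpget]
    by_cases hvalid : maxCost - (pvP ds k - pvP ds lo) - ds[k] ≥ 0
    · -- window [lo, k] valid; bl = lo
      have hloval : target ≤ pvP ds lo := by rw [htarget, hPk1]; linarith
      have hbl_le : bl ≤ lo := by
        by_contra hc
        have h1 := hblo lo (by omega) (by omega)
        rw [hget lo (by omega)] at h1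
        linarith
      have hbl_ge : lo ≤ bl := by
        by_contra hc
        have hblt : bl < lo := by omega
        rcases hinv with h0 | hinv4
        · omega
        · have h1 := hbhi bl (by omega) (le_refl bl)
          rw [hget bl (by omega)] at h1
          have h2 : pvP ds bl ≤ pvP ds (lo - 1) := pvP_mono ds hnn (by omega)
          have h3 : pvP ds k ≤ pvP ds (k+1) := pvP_mono ds hnn (by omega)
          rw [htarget] at h1
          linarith
      have hbleq : bl = lo := le_antisymm hbl_le hbl_ge
      refine ⟨lo, by omega, ?_, ?_, ?_⟩
      · rw [if_pos hvalid]
        simp only [Prod.mk.injEq]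
        refine ⟨trivial, ?_, by rw [hPk1]; ring⟩
        rw [max_eq_right (by linarith)]
        push_cast; ring
      · rw [← hbl, hbleq]
        rw [max_eq_right (by linarith)]
        push_cast; ring
      · rcases hinv with h0 | hinv4
        · exact Or.inl h0
        · have h3 : pvP ds k ≤ pvP ds (k+1) := pvP_mono ds hnn (by omega)
          exact Or.inr (by linarith)
    · -- window invalid; lo advances; bl ≥ lo + 1
      have hvalid := lt_of_not_ge hvalid
      have hloinval : pvP ds lo < target := by rw [htarget, hPk1]; linarith
      have hbl_ge : lo + 1 ≤ bl := by
        by_contra hc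
        have h1 := hbhi bl (by omega) (le_refl bl)
        rw [hget bl (by omega)] at h1
        have h2 : pvP ds bl ≤ pvP ds lo := pvP_mono ds hnn (by omega)
        linarith
      have hlo : lo < ds.length := by omega
      have hgetlo : PySem.List.pyGet? ds ((lo : Nat) : Int) = some ds[lo] :=
        PySem.List.pyGet?_ofNat ds lo hlo
      have hPlo1 : pvP ds (lo+1) = pvP ds lo + ds[lo] := pvP_succ ds lo hlo
      refine ⟨lo + 1, by omega, ?_, ?_, ?_⟩
      · rw [if_neg (by linarith)]
        simp only [hgetlo, Option.getD_some, Prod.mk.injEq]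
        refine ⟨by push_cast; ring, by push_cast; ring, by rw [hPk1, hPlo1]; ring⟩
      · rw [← hbl]
        have hc : (k : Int) + 1 - bl ≤ (k : Int) - lo := by
          have hcast : ((lo : Int) + 1) ≤ (bl : Int) := by exact_mod_cast hbl_ge
          linarith
        rw [max_eq_left hc]; push_cast; ring
      · refine Or.inr ?_
        rw [hPk1]
        simp only [Nat.add_sub_cancel]
        linarith

theorem pv_main (s t : String) (maxCost : Int) (h : s.toList.length ≤ t.toList.length) :
    p1208 s t maxCost = p1208_alt s t maxCost := by
  have hnn : ∀ x ∈ pvDiffs s t, 0 ≤ x := by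
    intro x hx
    simp only [pvDiffs, List.mem_map] at hx
    obtain ⟨p, _, rfl⟩ := hx
    exact abs_nonneg _
  have hlen : s.toList.length = (pvDiffs s t).length := by
    simp only [pvDiffs, List.length_map, List.length_zip]; omega
  obtain ⟨lo, _, hA, hB, _⟩ :=
    loop_eq (pvDiffs s t) maxCost hnn (pvDiffs s t).length (le_refl _)
  unfold p1208 p1208_alt
  simp only [hlen, hA, hB]

-- ===== VERDICT (by name: the statement is the Claim_ definition above) =====
theorem p1208_spec : Claim_equal_p1208 := by
  intro s t maxCost _ hpre
  exact pv_main s t maxCost hpre
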